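-- pv_equiv track=rewrite | github.com/rctillquist20/random-geometric-graphs | solve.py | is_resolving_set
-- ===== SOURCE A (Python) =====
-- def is_resolving_set(distance_matrix, test_set):
--     seen_rows = set()
--
--     for row in distance_matrix:
--         row_tuple = tuple(row)
--         if row_tuple in seen_rows:
--             return False
--         seen_rows.add(row_tuple)
--
--     return True
-- ===== SOURCE B (Python) =====
-- def is_resolving_set(distance_matrix, test_set):
--     rows = sorted(tuple(row) for row in distance_matrix)
--     return all(a != b for a, b in zip(rows, rows[1:]))
-- ===== Notes on version B (the rewrite author's own statement) =====
-- stated objective: alternative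
-- what changed: Replaces A's incremental hash-set membership loop with sort-then-scan: sort the rows lexicographically and check that no two adjacent rows are equal (no set, no hashing).
import Mathlib
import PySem

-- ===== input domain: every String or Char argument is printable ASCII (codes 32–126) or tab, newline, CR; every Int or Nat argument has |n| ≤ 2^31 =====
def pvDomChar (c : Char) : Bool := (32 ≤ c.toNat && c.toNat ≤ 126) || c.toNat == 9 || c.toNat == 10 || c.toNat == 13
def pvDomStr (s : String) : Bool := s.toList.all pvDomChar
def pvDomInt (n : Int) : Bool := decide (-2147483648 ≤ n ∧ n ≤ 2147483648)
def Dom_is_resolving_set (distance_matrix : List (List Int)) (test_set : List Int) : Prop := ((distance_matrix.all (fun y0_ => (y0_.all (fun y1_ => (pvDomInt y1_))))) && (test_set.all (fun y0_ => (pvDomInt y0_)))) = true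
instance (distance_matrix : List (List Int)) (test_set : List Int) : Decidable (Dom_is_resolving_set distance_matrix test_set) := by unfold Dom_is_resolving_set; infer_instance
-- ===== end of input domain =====

-- B replaces A's hash-set duplicate detection by sort-then-adjacent-scan (alternative algorithm; no hashing).

-- ===== PORT A =====
-- loop 'for row in distance_matrix' with the seen-rows set and early return False on a repeated row
def isResGo (seen : PySem.Set (List Int)) : List (List Int) → Bool
  | [] => true
  | r :: rs => if PySem.Set.contains seen r then false else isResGo (PySem.Set.add seen r) rs

def is_resolving_set (distance_matrix : List (List Int)) (_test_set : List Int) : Bool :=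
  isResGo PySem.Set.empty distance_matrix

-- ===== PORT B =====
-- all(a != b for a, b in zip(rows, rows[1:])): scan adjacent pairs, short-circuiting on equality
def adjDistinct : List (List Int) → Bool
  | [] => true
  | [_] => true
  | a :: b :: t => (a != b) && adjDistinct (b :: t)

-- sorted(tuples) — Python's lexicographic tuple order is List.instLinearOrder's lexicographic order on List Int
def is_resolving_set_alt (distance_matrix : List (List Int)) (_test_set : List Int) : Bool :=
  let rows := @PySem.List.sorted (List Int) (List Int) List.instLinearOrder.toLT LinearOrder.toDecidableLT distance_matrix (fun x => x) false
  adjDistinct rows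

-- ===== PRECONDITION & SPEC =====
def Spec_is_resolving_set (distance_matrix : List (List Int)) (test_set : List Int) (out : Bool) : Prop := out = is_resolving_set_alt distance_matrix test_set
instance (distance_matrix : List (List Int)) (test_set : List Int) (out : Bool) : Decidable (Spec_is_resolving_set distance_matrix test_set out) := by unfold Spec_is_resolving_set; infer_instance

-- ===== CLAIM (what is proved, stated in full; the proofs are below) =====
def Claim_equal_is_resolving_set : Prop := ∀ (distance_matrix : List (List Int)) (test_set : List Int), Dom_is_resolving_set distance_matrix test_set → Spec_is_resolving_set distance_matrix test_set (is_resolving_set distance_matrix test_set)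

-- ===== LEMMAS AND PROOFS =====

-- A's loop returns true iff the remaining rows are pairwise distinct and none was seen before
lemma isResGo_true_iff (rs : List (List Int)) (s : PySem.Set (List Int)) :
    isResGo s rs = true ↔ rs.Nodup ∧ ∀ r ∈ rs, r ∉ s := by
  induction rs generalizing s with
  | nil => simp [isResGo]
  | cons r rs ih =>
    simp only [isResGo]
    by_cases h : r ∈ s
    · have hc : PySem.Set.contains s r = true := by rw [PySem.Set.contains_iff]; exact h
      rw [if_pos hc]
      constructor
      · intro habs; exact absurd habs (by simp)
      · rintro ⟨_, hall⟩; exact absurd h (hall r (by simp))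
    · have hc : ¬ PySem.Set.contains s r = true := by rw [PySem.Set.contains_iff]; exact h
      rw [if_neg hc, ih]
      constructor
      · rintro ⟨hnd, hall⟩
        refine ⟨List.nodup_cons.mpr ⟨fun hm => ?_, hnd⟩, ?_⟩
        · exact (hall r hm) ((PySem.Set.mem_add s r r).mpr (Or.inr rfl))
        · intro x hx
          rcases List.mem_cons.mp hx with rfl | hx
          · exact h
          · intro hxs
            exact (hall x hx) ((PySem.Set.mem_add s r x).mpr (Or.inl hxs))
      · rintro ⟨hnd, hall⟩
        rcases List.nodup_cons.mp hnd with ⟨hr, hnd'⟩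
        refine ⟨hnd', ?_⟩
        intro x hx hxs
        rcases (PySem.Set.mem_add s r x).mp hxs with hxs | rfl
        · exact (hall x (by simp [hx])) hxs
        · exact hr hx

lemma A_true_iff (dm : List (List Int)) (ts : List Int) :
    is_resolving_set dm ts = true ↔ dm.Nodup := by
  unfold is_resolving_set
  rw [isResGo_true_iff]
  simp [PySem.Set.empty]

-- the adjacent scan is the chain of ≠ on consecutive elements
lemma adjDistinct_iff_chain (xs : List (List Int)) :
    adjDistinct xs = true ↔ xs.IsChain (· ≠ ·) := by
  induction xs with
  | nil => simp [adjDistinct]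
  | cons a t ih =>
    cases t with
    | nil => simp [adjDistinct, List.isChain_cons]
    | cons b t' =>
      simp only [adjDistinct, Bool.and_eq_true, bne_iff_ne, ne_eq, List.isChain_cons,
        List.head?_cons, Option.mem_def, Option.some.injEq, forall_eq']
      rw [ih]
      simp [List.isChain_cons]

-- on a ≤-sorted list, adjacent-distinct is exactly Nodup
lemma chain_pairwise_nodup (xs : List (List Int)) (hle : xs.Pairwise (· ≤ ·)) :
    xs.IsChain (· ≠ ·) ↔ xs.Nodup := by
  constructor
  · intro hch
    have hlt : xs.IsChain (· < ·) := by
      have hchle : xs.IsChain (· ≤ ·) := hle.isChain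
      rw [List.isChain_iff_getElem] at hch hchle ⊢
      intro i h
      exact lt_of_le_of_ne (hchle i h) (hch i h)
    have hpw : xs.Pairwise (· < ·) := List.isChain_iff_pairwise.mp hlt
    exact hpw.imp (fun h => ne_of_lt h)
  · intro hnd
    exact hnd.isChain

-- ===== VERDICT (by name: the statement is the Claim_ definition above) =====
theorem is_resolving_set_spec : Claim_equal_is_resolving_set := by
  intro dm ts _
  unfold Spec_is_resolving_set
  unfold is_resolving_set_alt
  have hperm : (@PySem.List.sorted (List Int) (List Int) List.instLinearOrder.toLT LinearOrder.toDecidableLT dm (fun x => x) false).Perm dm :=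
    @PySem.List.sorted_perm (List Int) (List Int) List.instLinearOrder.toLT LinearOrder.toDecidableLT dm (fun x => x) false
  have hpw : (@PySem.List.sorted (List Int) (List Int) List.instLinearOrder.toLT LinearOrder.toDecidableLT dm (fun x => x) false).Pairwise (· ≤ ·) := by
    have := @PySem.List.sorted_pairwise (List Int) (List Int) _ dm (fun x => x)
    simpa using this
  rw [Bool.eq_iff_iff, A_true_iff, adjDistinct_iff_chain, chain_pairwise_nodup _ hpw,
    hperm.nodup_iff]
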